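-- pv_equiv track=rewrite | github.com/creative-computing-society/Codeblood-Backend | discord_bot/cogs/AutoParing.py | pair_teams_linear
-- ===== SOURCE A (Python) =====
-- def pair_teams_linear(teams_iterable):
--     size_buckets = {1: [], 2: [], 3: []}
--     for team in teams_iterable:
--         n = len(team["players"])
--         if 1 <= n <= 3:
--             size_buckets[n].append(team)
--
--     result = []
--
--     # Pair 2 + 2
--     twos = size_buckets[2]
--     while len(twos) >= 2:
--         result.append((twos.pop(), twos.pop()))
--
--     # Pair 3 + 1
--     ones, threes = size_buckets[1], size_buckets[3]
--     while ones and threes: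
--         result.append((ones.pop(), threes.pop()))
--
--     return result
-- ===== SOURCE B (Python) =====
-- def pair_teams_linear(teams_iterable):
--     def size(t):
--         return len(t["players"])
--
--     def chunk2(xs):
--         return [(xs[0], xs[1])] + chunk2(xs[2:]) if len(xs) >= 2 else []
--
--     rtwos = [t for t in teams_iterable if size(t) == 2][::-1]
--     rones = [t for t in teams_iterable if size(t) == 1][::-1]
--     rthrees = [t for t in teams_iterable if size(t) == 3][::-1]
--     return chunk2(rtwos) + list(zip(rones, rthrees))
-- ===== Notes on version B (the rewrite author's own statement) =====
-- stated objective: simpler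
-- what changed: Replaces the mutating bucket dict and the two destructive while/pop loops by pure filtered-and-reversed buckets paired with a recursive consecutive-pair helper and zip (no mutation, zip truncation replaces the while condition).
import Mathlib
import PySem

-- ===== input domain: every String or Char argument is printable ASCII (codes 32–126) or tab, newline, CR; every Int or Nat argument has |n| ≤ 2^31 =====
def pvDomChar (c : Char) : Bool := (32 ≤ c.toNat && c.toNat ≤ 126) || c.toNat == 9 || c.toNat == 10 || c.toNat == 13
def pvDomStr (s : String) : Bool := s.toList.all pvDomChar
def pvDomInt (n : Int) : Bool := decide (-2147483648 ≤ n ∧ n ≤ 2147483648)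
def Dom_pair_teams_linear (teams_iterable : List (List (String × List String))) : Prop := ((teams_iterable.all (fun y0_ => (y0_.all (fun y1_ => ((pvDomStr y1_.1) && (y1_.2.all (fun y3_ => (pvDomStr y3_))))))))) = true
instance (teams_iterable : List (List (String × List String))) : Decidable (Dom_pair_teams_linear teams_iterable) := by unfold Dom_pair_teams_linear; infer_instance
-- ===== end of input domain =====

-- B replaces the mutating size-bucket dict and the two destructive while/pop loops by pure
-- filter+reverse buckets combined with a recursive consecutive-pair helper and zip (simpler; same cost).


-- ===== PORT A =====
-- 'while len(twos) >= 2: result.append((twos.pop(), twos.pop()))'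
def pvWhileTwos (twos : List (List (String × List String)))
    (result : List ((List (String × List String)) × (List (String × List String)))) :
    List ((List (String × List String)) × (List (String × List String))) :=
  if 2 ≤ twos.length then
    pvWhileTwos twos.dropLast.dropLast (result ++ [(twos.getLastD [], twos.dropLast.getLastD [])])
  else result
termination_by twos.length
decreasing_by simp [List.length_dropLast]; omega

-- 'while ones and threes: result.append((ones.pop(), threes.pop()))'
def pvWhileOnesThrees (ones threes : List (List (String × List String)))
    (result : List ((List (String × List String)) × (List (String × List String)))) :
    List ((List (String × List String)) × (List (String × List String))) :=
  if ones ≠ [] ∧ threes ≠ [] then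
    pvWhileOnesThrees ones.dropLast threes.dropLast (result ++ [(ones.getLastD [], threes.getLastD [])])
  else result
termination_by ones.length
decreasing_by rename_i h; simp [List.length_dropLast]; cases ones <;> simp_all

def pair_teams_linear (teams_iterable : List (List (String × List String))) : List ((List (String × List String)) × (List (String × List String))) :=
  -- size_buckets = {1: [], 2: [], 3: []}; the dict with fixed keys 1,2,3 is carried as a triple
  let buckets := teams_iterable.foldl
    (fun (b : List (List (String × List String)) × List (List (String × List String)) × List (List (String × List String))) team =>
      let n := ((PySem.Dict.get? (PySem.Dict.ofList team) "players").getD []).length  -- len(team["players"]); KeyError excluded by Pre_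
      if n = 1 then (b.1 ++ [team], b.2.1, b.2.2)
      else if n = 2 then (b.1, b.2.1 ++ [team], b.2.2)
      else if n = 3 then (b.1, b.2.1, b.2.2 ++ [team])
      else b) ([], [], [])
  let result := pvWhileTwos buckets.2.1 []
  pvWhileOnesThrees buckets.1 buckets.2.2 result

-- ===== PORT B =====
-- 'chunk2(xs) = [(xs[0], xs[1])] + chunk2(xs[2:]) if len(xs) >= 2 else []'
def pvChunk2 (xs : List (List (String × List String))) :
    List ((List (String × List String)) × (List (String × List String))) :=
  match xs with
  | a :: b :: r => (a, b) :: pvChunk2 r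
  | _ => []

def pair_teams_linear_alt (teams_iterable : List (List (String × List String))) : List ((List (String × List String)) × (List (String × List String))) :=
  let size := fun (t : List (String × List String)) =>
    ((PySem.Dict.get? (PySem.Dict.ofList t) "players").getD []).length  -- len(t["players"]); KeyError excluded by Pre_
  let rtwos := (teams_iterable.filter (fun t => size t == 2)).reverse
  let rones := (teams_iterable.filter (fun t => size t == 1)).reverse
  let rthrees := (teams_iterable.filter (fun t => size t == 3)).reverse
  pvChunk2 rtwos ++ List.zip rones rthrees

-- ===== PRECONDITION & SPEC =====
-- Pre_ excludes exactly the inputs where some team dict lacks the "players" key: there A raises KeyError.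
def Pre_pair_teams_linear (teams_iterable : List (List (String × List String))) : Prop :=
  (teams_iterable.all (fun t => (PySem.Dict.get? (PySem.Dict.ofList t) "players").isSome)) = true
instance (teams_iterable : List (List (String × List String))) : Decidable (Pre_pair_teams_linear teams_iterable) := by unfold Pre_pair_teams_linear; infer_instance

def pvWitness_pair_teams_linear : (List (List (String × List String))) :=
  [[("players", ["a", "b"])], [("players", ["c", "d"])], [("players", ["e"])], [("players", ["f", "g", "h"])]]

def Spec_pair_teams_linear (teams_iterable : List (List (String × List String))) (out : List ((List (String × List String)) × (List (String × List String)))) : Prop := out = pair_teams_linear_alt teams_iterable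
instance (teams_iterable : List (List (String × List String))) (out : List ((List (String × List String)) × (List (String × List String)))) : Decidable (Spec_pair_teams_linear teams_iterable out) := by unfold Spec_pair_teams_linear; infer_instance

-- ===== CLAIM (what is proved, stated in full; the proofs are below) =====
def Claim_equal_pair_teams_linear : Prop := ∀ (teams_iterable : List (List (String × List String))), Dom_pair_teams_linear teams_iterable → Pre_pair_teams_linear teams_iterable → Spec_pair_teams_linear teams_iterable (pair_teams_linear teams_iterable)

-- ===== LEMMAS AND PROOFS =====

-- A's 2+2 pop loop on a list equals consecutive pairing of its reverse.
theorem pvWhileTwos_rev : ∀ (m : List (List (String × List String)))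
    (res : List ((List (String × List String)) × (List (String × List String)))),
    pvWhileTwos m.reverse res = res ++ pvChunk2 m
  | [], res => by simp [pvWhileTwos, pvChunk2]
  | [a], res => by simp [pvWhileTwos, pvChunk2]
  | a :: b :: r, res => by
    have hshape : (a :: b :: r).reverse = (r.reverse ++ [b]) ++ [a] := by simp
    rw [hshape, pvWhileTwos]
    have hlen : 2 ≤ ((r.reverse ++ [b]) ++ [a]).length := by simp
    simp only [hlen, if_pos, List.dropLast_concat, List.getLastD_concat]
    rw [pvWhileTwos_rev r]
    simp [pvChunk2]

-- A's 3+1 pop loop equals zip of the reversed buckets.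
theorem pvWhileOnesThrees_rev : ∀ (mo mt : List (List (String × List String)))
    (res : List ((List (String × List String)) × (List (String × List String)))),
    pvWhileOnesThrees mo.reverse mt.reverse res = res ++ List.zip mo mt
  | [], mt, res => by simp [pvWhileOnesThrees]
  | mo, [], res => by
    rw [pvWhileOnesThrees]; simp
  | a :: ro, c :: rt, res => by
    have h1 : (a :: ro).reverse = ro.reverse ++ [a] := by simp
    have h2 : (c :: rt).reverse = rt.reverse ++ [c] := by simp
    rw [h1, h2, pvWhileOnesThrees]
    have hne : (ro.reverse ++ [a]) ≠ [] ∧ (rt.reverse ++ [c]) ≠ [] := by simp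
    simp only [List.dropLast_concat, List.getLastD_concat]
    rw [pvWhileOnesThrees_rev ro rt]
    simp [List.zip]

-- A's bucketing fold equals three filters (with the accumulator generalized).
theorem pvBuckets_eq (teams : List (List (String × List String)))
    (o t th : List (List (String × List String))) :
    teams.foldl
      (fun (b : List (List (String × List String)) × List (List (String × List String)) × List (List (String × List String))) team =>
        let n := ((PySem.Dict.get? (PySem.Dict.ofList team) "players").getD []).length
        if n = 1 then (b.1 ++ [team], b.2.1, b.2.2)
        else if n = 2 then (b.1, b.2.1 ++ [team], b.2.2)
        else if n = 3 then (b.1, b.2.1, b.2.2 ++ [team])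
        else b) (o, t, th)
    = (o ++ teams.filter (fun x => ((PySem.Dict.get? (PySem.Dict.ofList x) "players").getD []).length == 1),
       t ++ teams.filter (fun x => ((PySem.Dict.get? (PySem.Dict.ofList x) "players").getD []).length == 2),
       th ++ teams.filter (fun x => ((PySem.Dict.get? (PySem.Dict.ofList x) "players").getD []).length == 3)) := by
  induction teams generalizing o t th with
  | nil => simp
  | cons team rest ih =>
    simp only [List.foldl_cons, List.filter_cons]
    by_cases h1 : ((PySem.Dict.get? (PySem.Dict.ofList team) "players").getD []).length = 1
    · simp [h1, ih]
    · by_cases h2 : ((PySem.Dict.get? (PySem.Dict.ofList team) "players").getD []).length = 2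
      · simp [h2, ih]
      · by_cases h3 : ((PySem.Dict.get? (PySem.Dict.ofList team) "players").getD []).length = 3
        · simp [h3, ih]
        · simp [h1, h2, h3, ih]

-- ===== VERDICT (by name: the statement is the Claim_ definition above) =====
theorem pair_teams_linear_spec : Claim_equal_pair_teams_linear := by
  intro teams _ _
  unfold Spec_pair_teams_linear pair_teams_linear pair_teams_linear_alt
  simp only [pvBuckets_eq teams [] [] [], List.nil_append]
  rw [show (teams.filter (fun x => ((PySem.Dict.get? (PySem.Dict.ofList x) "players").getD []).length == 2))
        = (teams.filter (fun x => ((PySem.Dict.get? (PySem.Dict.ofList x) "players").getD []).length == 2)).reverse.reverse by simp,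
      pvWhileTwos_rev, List.nil_append]
  rw [show (teams.filter (fun x => ((PySem.Dict.get? (PySem.Dict.ofList x) "players").getD []).length == 1))
        = (teams.filter (fun x => ((PySem.Dict.get? (PySem.Dict.ofList x) "players").getD []).length == 1)).reverse.reverse by simp]
  rw [show (teams.filter (fun x => ((PySem.Dict.get? (PySem.Dict.ofList x) "players").getD []).length == 3))
        = (teams.filter (fun x => ((PySem.Dict.get? (PySem.Dict.ofList x) "players").getD []).length == 3)).reverse.reverse by simp]
  rw [pvWhileOnesThrees_rev]
  simp
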